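-- pv_equiv track=rewrite | github.com/EmineCakal5/Film_Uygulamas- | recursive_faktoriyel.py | faktoriyel_recursive
-- ===== SOURCE A (Python) =====
-- def faktoriyel_recursive(n, liste=None):
--     if liste is None:
--         liste = []
--     if n == 0 or n == 1:
--         liste.append(1)
--         return 1, liste
--     else :
--         onceki, liste = faktoriyel_recursive(n - 1, liste)
--         simdiki = n * onceki
--         liste.append(simdiki)
--         return simdiki, liste
-- ===== SOURCE B (Python) =====
-- def faktoriyel_recursive(n, liste=None):
--     if liste is None:
--         liste = []
--     if n == 0:
--         liste.append(1)
--         return 1, liste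
--     result = 1
--     for i in range(1, n + 1):
--         result *= i
--         liste.append(result)
--     return result, liste
-- ===== Notes on version B (the rewrite author's own statement) =====
-- stated objective: idiomatic
-- what changed: Replaces the linear recursion with a single forward loop over range(1, n+1) accumulating the running product; only n==0 keeps a special case.
import Mathlib
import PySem

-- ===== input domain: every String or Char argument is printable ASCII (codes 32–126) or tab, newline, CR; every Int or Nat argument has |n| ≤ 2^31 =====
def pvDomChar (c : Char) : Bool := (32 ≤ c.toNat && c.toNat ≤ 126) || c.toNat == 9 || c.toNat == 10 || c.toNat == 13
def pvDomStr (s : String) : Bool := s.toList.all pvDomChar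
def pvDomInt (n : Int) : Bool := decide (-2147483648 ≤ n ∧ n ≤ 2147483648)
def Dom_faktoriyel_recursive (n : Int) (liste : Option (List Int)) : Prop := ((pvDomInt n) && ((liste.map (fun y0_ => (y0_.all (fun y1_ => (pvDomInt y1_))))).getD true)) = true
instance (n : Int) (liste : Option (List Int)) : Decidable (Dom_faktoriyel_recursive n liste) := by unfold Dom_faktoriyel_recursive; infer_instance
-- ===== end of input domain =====

-- B replaces the linear recursion with a single forward loop over range(1, n+1);
-- equivalence is about the RETURN value only (both Pythons append to a caller-supplied list in place).

-- ===== PORT A =====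
-- fuel makes the recursion total in Lean; for n ≥ 0 the fuel n.toNat + 1 is never exhausted
def faktoriyel_recursive_go (fuel : Nat) (n : Int) (liste : List Int) : Int × List Int :=
  match fuel with
  | 0 => (0, liste)
  | fuel + 1 =>
    if n = 0 ∨ n = 1 then (1, liste ++ [1])
    else
      let p := faktoriyel_recursive_go fuel (n - 1) liste
      let simdiki := n * p.1
      (simdiki, p.2 ++ [simdiki])

def faktoriyel_recursive (n : Int) (liste : Option (List Int)) : Int × List Int :=
  faktoriyel_recursive_go (n.toNat + 1) n (liste.getD [])

-- ===== PORT B =====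
def faktoriyel_recursive_alt (n : Int) (liste : Option (List Int)) : Int × List Int :=
  let l := liste.getD []
  if n = 0 then (1, l ++ [1])
  else
    (PySem.List.pyRange 1 (n + 1) 1).foldl
      (fun (p : Int × List Int) i => (p.1 * i, p.2 ++ [p.1 * i])) (1, l)

-- ===== PRECONDITION & SPEC =====
-- Pre_ excludes n < 0, on which A recurses without a base case and raises RecursionError
def Pre_faktoriyel_recursive (n : Int) (liste : Option (List Int)) : Prop := 0 ≤ n
instance (n : Int) (liste : Option (List Int)) : Decidable (Pre_faktoriyel_recursive n liste) := by unfold Pre_faktoriyel_recursive; infer_instance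
def pvWitness_faktoriyel_recursive : Int × Option (List Int) := (5, some [7])

def Spec_faktoriyel_recursive (n : Int) (liste : Option (List Int)) (out : Int × List Int) : Prop := out = faktoriyel_recursive_alt n liste
instance (n : Int) (liste : Option (List Int)) (out : Int × List Int) : Decidable (Spec_faktoriyel_recursive n liste out) := by unfold Spec_faktoriyel_recursive; infer_instance

-- ===== CLAIM (what is proved, stated in full; the proofs are below) =====
def Claim_equal_faktoriyel_recursive : Prop := ∀ (n : Int) (liste : Option (List Int)), Dom_faktoriyel_recursive n liste → Pre_faktoriyel_recursive n liste → Spec_faktoriyel_recursive n liste (faktoriyel_recursive n liste)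

-- ===== LEMMAS AND PROOFS =====

-- A's recursion with enough fuel agrees with B's fold, for n = m + 1 ≥ 1
lemma faktoriyel_go_eq_fold (m : Nat) (l : List Int) :
    faktoriyel_recursive_go (m + 1 + 1) ((m : Int) + 1) l =
      (PySem.List.pyRange 1 ((m : Int) + 1 + 1) 1).foldl
        (fun (p : Int × List Int) i => (p.1 * i, p.2 ++ [p.1 * i])) (1, l) := by
  induction m with
  | zero =>
      rw [show ((0 : Nat) : Int) + 1 + 1 = 1 + 1 by ring, PySem.List.pyRange_one_singleton]
      simp [faktoriyel_recursive_go]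
  | succ k ih =>
      push_cast
      have hsplit : PySem.List.pyRange 1 (((k : Int) + 1) + 1 + 1) 1
          = PySem.List.pyRange 1 ((k : Int) + 1 + 1) 1 ++ [(k : Int) + 1 + 1] := by
        have := PySem.List.pyRange_one_succ_right (a := 1) (b := (k : Int) + 1 + 1) (by push_cast; omega)
        simpa using this
      rw [hsplit, List.foldl_append]
      have hne : ¬ (((k : Nat) : Int) + 1 + 1 = 0 ∨ ((k : Nat) : Int) + 1 + 1 = 1) := by
        push_cast; omega
      show faktoriyel_recursive_go (k + 1 + 1 + 1) (((k : Nat) : Int) + 1 + 1) l = _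
      rw [faktoriyel_recursive_go, if_neg hne]
      rw [show ((k : Nat) : Int) + 1 + 1 - 1 = ((k : Nat) : Int) + 1 by ring]
      rw [ih]
      simp only [List.foldl_cons, List.foldl_nil]
      simp [Int.mul_comm]

-- ===== VERDICT (by name: the statement is the Claim_ definition above) =====
theorem faktoriyel_recursive_spec : Claim_equal_faktoriyel_recursive := by
  intro n liste _ hpre
  unfold Spec_faktoriyel_recursive faktoriyel_recursive faktoriyel_recursive_alt
  by_cases h0 : n = 0
  · subst h0; simp [faktoriyel_recursive_go]
  · rw [if_neg h0]
    have h1 : 1 ≤ n := by unfold Pre_faktoriyel_recursive at hpre; omega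
    obtain ⟨m, hm⟩ : ∃ m : Nat, n = (m : Int) + 1 := ⟨(n - 1).toNat, by omega⟩
    subst hm
    rw [show ((m : Int) + 1).toNat + 1 = m + 1 + 1 by omega]
    exact faktoriyel_go_eq_fold m (liste.getD [])
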